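-- pv_equiv track=rewrite | github.com/AlbinSmiley/bezoutPython | base26.py | enBase26
-- ===== SOURCE A (Python) =====
-- def enBase26(array):
--     result = [0] * len(array)  # Initialise result avec des zéros pour chaque sous-liste
--     for i in range(len(array)):
--         length = len(array[i])
--         for j, number in enumerate(array[i]):
--             puissance = length - j - 1  # Calcule la puissance correcte pour chaque position
--             result[i] += number * (26 ** puissance)
--     return result
-- ===== SOURCE B (Python) =====
-- def enBase26(array):
--     # Horner's method per sublist: one multiply-add per digit, no repeated exponentiation.
--     out = []
--     for digits in array:
--         acc = 0
--         for d in digits: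
--             acc = acc * 26 + d
--         out.append(acc)
--     return out
-- ===== Notes on version B (the rewrite author's own statement) =====
-- stated objective: faster
-- what changed: Replaces the per-position power computation 26**(length-j-1) accumulated into a preallocated result slot with a single-pass Horner evaluation acc = acc*26 + d per sublist, building the output by appending.
import Mathlib
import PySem

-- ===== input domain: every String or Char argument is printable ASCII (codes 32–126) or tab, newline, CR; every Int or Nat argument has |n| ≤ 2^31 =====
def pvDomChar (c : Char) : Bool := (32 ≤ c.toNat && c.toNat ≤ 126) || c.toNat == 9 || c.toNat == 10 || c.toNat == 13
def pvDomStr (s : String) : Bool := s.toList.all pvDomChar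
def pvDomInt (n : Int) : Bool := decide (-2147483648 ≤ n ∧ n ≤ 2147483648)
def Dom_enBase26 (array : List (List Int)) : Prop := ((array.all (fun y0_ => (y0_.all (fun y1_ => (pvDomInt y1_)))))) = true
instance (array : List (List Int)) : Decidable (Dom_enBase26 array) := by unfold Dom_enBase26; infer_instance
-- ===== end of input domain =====

-- B replaces A's per-position exponentiation with a single-pass Horner evaluation per sublist (faster).

-- ===== PORT A =====
-- result = [0]*len(array); for i in range(len(array)): for j,number in enumerate(array[i]):
--   result[i] += number * 26**(length-j-1).  The exponent length-j-1 is ≥ 0 since j < length,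
--   so `.toNat` on it is exact Python `**`.
def enBase26 (array : List (List Int)) : List Int :=
  (PySem.List.pyRange 0 array.length 1).foldl
    (fun result i =>
      let row := PySem.List.pyGetD array i []
      let length : Int := row.length
      (PySem.List.enumerate row 0).foldl
        (fun res jn =>
          let puissance := length - jn.1 - 1
          res.set i.toNat (res.getD i.toNat 0 + jn.2 * 26 ^ puissance.toNat))
        result)
    (List.replicate array.length 0)

-- ===== PORT B =====
def enBase26_alt (array : List (List Int)) : List Int :=
  array.map (fun digits => digits.foldl (fun acc d => acc * 26 + d) 0)

-- ===== PRECONDITION & SPEC =====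
def Spec_enBase26 (array : List (List Int)) (out : List Int) : Prop := out = enBase26_alt array
instance (array : List (List Int)) (out : List Int) : Decidable (Spec_enBase26 array out) := by unfold Spec_enBase26; infer_instance

-- ===== CLAIM (what is proved, stated in full; the proofs are below) =====
def Claim_equal_enBase26 : Prop := ∀ (array : List (List Int)), Dom_enBase26 array → Spec_enBase26 array (enBase26 array)

-- ===== LEMMAS AND PROOFS =====

-- the positional value of a digit list: T (d :: row) = d * 26^row.length + T row
def pvT : List Int → Int
  | [] => 0
  | d :: row => d * 26 ^ row.length + pvT row

-- setting an index to its current value is a no-op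
theorem pv_set_getD (l : List Int) (i : Nat) : l.set i (l.getD i 0) = l := by
  by_cases h : i < l.length
  · rw [List.getD_eq_getElem l 0 h]; exact List.set_getElem_self h
  · exact List.set_eq_of_length_le (Nat.le_of_not_lt h)

-- the inner loop only accumulates into slot i: it equals a single set of the summed increments
theorem pv_inner (i : Nat) {α : Type} (g : α → Int) :
    ∀ (ps : List α) (res : List Int),
      ps.foldl (fun r p => r.set i (r.getD i 0 + g p)) res
        = res.set i (res.getD i 0 + (ps.map g).sum) := by
  intro ps
  induction ps with
  | nil =>
    intro res
    simp only [List.foldl_nil, List.map_nil, List.sum_nil, add_zero]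
    exact (pv_set_getD res i).symm
  | cons p ps ih =>
    intro res
    simp only [List.foldl_cons, ih, List.map_cons, List.sum_cons]
    by_cases h : i < res.length
    · have h' : i < (res.set i (res.getD i 0 + g p)).length := by simpa using h
      rw [List.getD_eq_getElem (res.set i (res.getD i 0 + g p)) 0 h',
          List.getElem_set_self, List.set_set, add_assoc]
    · have hle := Nat.le_of_not_lt h
      rw [List.set_eq_of_length_le hle, List.set_eq_of_length_le hle,
          List.set_eq_of_length_le hle]

-- the enumerate-sum with powers computed from the full length equals pvT
theorem pv_sum_enum (row : List Int) :
    ∀ (s L : Int), L = s + row.length →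
      ((PySem.List.enumerate row s).map
        (fun jn => jn.2 * 26 ^ (L - jn.1 - 1).toNat)).sum = pvT row := by
  induction row with
  | nil => intro s L _; simp [PySem.List.enumerate_nil, pvT]
  | cons d row ih =>
    intro s L hL
    rw [PySem.List.enumerate_cons]
    simp only [List.map_cons, List.sum_cons, pvT]
    have h1 : L - s - 1 = (row.length : Int) := by
      rw [hL]; push_cast [List.length_cons]; ring
    have h2 : (L - s - 1).toNat = row.length := by rw [h1]; exact Int.toNat_natCast _
    rw [h2, ih (s + 1) L (by rw [hL]; push_cast [List.length_cons]; ring)]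

-- Horner's rule computes pvT
theorem pv_horner (row : List Int) :
    ∀ acc, row.foldl (fun acc d => acc * 26 + d) acc = acc * 26 ^ row.length + pvT row := by
  induction row with
  | nil => intro acc; simp [pvT]
  | cons d row ih =>
    intro acc
    simp only [List.foldl_cons, ih, pvT, List.length_cons]
    ring

-- outer-loop invariant: after processing indices [0, m), the first m slots are done
theorem pv_outer (array : List (List Int)) :
    ∀ (m : Nat), m ≤ array.length →
      (PySem.List.pyRange 0 m 1).foldl
        (fun result i =>
          let row := PySem.List.pyGetD array i []
          let length : Int := row.length
          (PySem.List.enumerate row 0).foldl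
            (fun res jn =>
              let puissance := length - jn.1 - 1
              res.set i.toNat (res.getD i.toNat 0 + jn.2 * 26 ^ puissance.toNat))
            result)
        (List.replicate array.length 0)
      = (array.take m).map pvT ++ List.replicate (array.length - m) 0 := by
  intro m
  induction m with
  | zero =>
    intro _
    rw [PySem.List.pyRange_one_eq_nil (by simp)]
    simp
  | succ m ih =>
    intro hm
    have hm' : m < array.length := Nat.lt_of_succ_le hm
    have hsplit : PySem.List.pyRange 0 (m + 1 : Nat) 1
        = PySem.List.pyRange 0 (m : Nat) 1 ++ [(m : Int)] := by
      have := PySem.List.pyRange_one_succ_right (a := 0) (b := (m : Int)) (by positivity)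
      simpa using this
    rw [hsplit, List.foldl_append, ih (Nat.le_of_lt hm')]
    simp only [List.foldl_cons, List.foldl_nil]
    have hget : PySem.List.pyGetD array (m : Int) [] = array[m] := by
      rw [PySem.List.pyGetD_of_nonneg array [] (by positivity), Int.toNat_natCast,
          List.getD_eq_getElem array [] hm']
    rw [hget, pv_inner, Int.toNat_natCast,
        pv_sum_enum array[m] 0 (array[m].length : Int) (by simp)]
    -- current state: prefix of length m, slot m holds 0
    have hlen : ((array.take m).map pvT).length = m := by
      simp [List.length_take, Nat.min_eq_left (Nat.le_of_lt hm')]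
    have hrep : array.length - m = (array.length - (m + 1)) + 1 := by omega
    rw [hrep]
    have hgetD : (((array.take m).map pvT) ++
        List.replicate ((array.length - (m + 1)) + 1) (0 : Int)).getD m 0 = 0 := by
      rw [List.getD_eq_getElem _ _ (by simp only [List.length_append, hlen, List.length_replicate]; omega)]
      rw [List.getElem_append_right (Nat.le_of_eq hlen)]
      simp
    rw [hgetD]
    have hset : (((array.take m).map pvT) ++
        List.replicate ((array.length - (m + 1)) + 1) (0 : Int)).set m (0 + pvT array[m])
        = ((array.take m).map pvT) ++ (pvT array[m] :: List.replicate (array.length - (m + 1)) 0) := by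
      rw [List.set_append_right _ _ (Nat.le_of_eq hlen), hlen, Nat.sub_self,
          List.replicate_succ, List.set_cons_zero, zero_add]
    rw [hset]
    have htake : (array.take (m + 1)).map pvT
        = ((array.take m).map pvT) ++ [pvT array[m]] := by
      rw [List.take_add_one, List.getElem?_eq_getElem hm']
      simp only [Option.toList_some, List.map_append, List.map_cons, List.map_nil]
    rw [htake, List.append_assoc, List.singleton_append]

-- ===== VERDICT (by name: the statement is the Claim_ definition above) =====
theorem enBase26_spec : Claim_equal_enBase26 := by
  intro array _
  unfold Spec_enBase26 enBase26 enBase26_alt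
  rw [pv_outer array array.length (le_refl _)]
  simp only [List.take_length, Nat.sub_self, List.replicate_zero, List.append_nil]
  exact List.map_congr_left (fun row _ => by rw [pv_horner row 0]; simp)
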